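-- pv_equiv track=rewrite | github.com/ederalab/python-workbook | es_176_pwb.py | phonetic_alphabet
-- ===== SOURCE A (Python) =====
-- def phonetic_alphabet(s, r):
--     d = {
--         "A": "Alpha",
--         "B": "Bravo",
--         "C": "Charlie",
--         "D": "Delta",
--         "E": "Echo",
--         "F": "Foxtrot",
--         "G": "Golf",
--         "H": "Hotel",
--         "I": "India",
--         "J": "Juliet",
--         "K": "Kilo",
--         "L": "Lima",
--         "M": "Mike",
--         "N": "November",
--         "O": "Oscar",
--         "P": "Papa",
--         "Q": "Quebec",
--         "R": "Romeo",
--         "S": "Sierra",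
--         "T": "Tango",
--         "U": "Uniform",
--         "V": "Victor",
--         "W": "Whiskey",
--         "X": "Xray",
--         "Y": "Yankee",
--         "Z": "Zulu"
--     }
--     result = r
--
--     if s == "" and result == "":
--         return "You entered an empty string"
--     else:
--         s = s.upper()
--         if "A" <= s[0] <= "Z":
--             result += d[s[0]] + " "
--         if s[1:] != "":
--             return phonetic_alphabet(s[1:], result)
--         else:
--             return result
-- ===== SOURCE B (Python) =====
-- def phonetic_alphabet(s, r):
--     if s == "" and r == "":
--         return "You entered an empty string"
--     words = ("Alpha", "Bravo", "Charlie", "Delta", "Echo", "Foxtrot", "Golf",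
--              "Hotel", "India", "Juliet", "Kilo", "Lima", "Mike", "November",
--              "Oscar", "Papa", "Quebec", "Romeo", "Sierra", "Tango", "Uniform",
--              "Victor", "Whiskey", "Xray", "Yankee", "Zulu")
--     pieces = []
--     for c in s.upper():
--         i = ord(c) - 65
--         if 0 <= i < 26:
--             pieces.append(words[i] + " ")
--     return r + "".join(pieces)
-- ===== Notes on version B (the rewrite author's own statement) =====
-- stated objective: faster
-- what changed: Replaces character-by-character recursion with a dict lookup per step (re-uppercasing and re-slicing the whole remaining suffix each call, O(n^2)) by one upfront uppercase, an arithmetically indexed word table (ord(c)-65 into a tuple, no dict), and a single join of the collected pieces.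
import Mathlib
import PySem

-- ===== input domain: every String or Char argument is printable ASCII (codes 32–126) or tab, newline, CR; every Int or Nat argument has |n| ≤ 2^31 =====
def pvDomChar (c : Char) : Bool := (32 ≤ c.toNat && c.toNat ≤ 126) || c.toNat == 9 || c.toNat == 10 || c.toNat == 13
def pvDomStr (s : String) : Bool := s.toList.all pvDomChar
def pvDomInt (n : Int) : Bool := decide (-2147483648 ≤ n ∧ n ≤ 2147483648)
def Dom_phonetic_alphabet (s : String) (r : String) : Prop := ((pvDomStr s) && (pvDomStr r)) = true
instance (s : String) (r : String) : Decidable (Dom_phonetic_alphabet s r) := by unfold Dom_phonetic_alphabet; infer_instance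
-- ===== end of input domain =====

-- B replaces A's character-by-character recursion (which re-uppercases and re-slices the whole
-- remaining suffix at every step) with one upfront uppercase, a map of each character through an
-- arithmetically indexed word table (ord(c)-65) collecting the pieces, and a single final join: faster.


-- ===== PORT A =====
-- the NATO dict d; keys are the single characters "A"…"Z" (Char under the convention, since
-- they are looked up with the character s[0])
def natoDict : PySem.Dict Char String := PySem.Dict.ofList
  [('A',"Alpha"),('B',"Bravo"),('C',"Charlie"),('D',"Delta"),('E',"Echo"),('F',"Foxtrot"),
   ('G',"Golf"),('H',"Hotel"),('I',"India"),('J',"Juliet"),('K',"Kilo"),('L',"Lima"),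
   ('M',"Mike"),('N',"November"),('O',"Oscar"),('P',"Papa"),('Q',"Quebec"),('R',"Romeo"),
   ('S',"Sierra"),('T',"Tango"),('U',"Uniform"),('V',"Victor"),('W',"Whiskey"),('X',"Xray"),
   ('Y',"Yankee"),('Z',"Zulu")]

-- A's recursion, on s.toList; the `none` arm of s[0] is Python's IndexError (s = "" with
-- result ≠ ""), excluded by Pre_; the dict default "" is unreachable (guard 'A' ≤ c ≤ 'Z').
def phoneticAux (cs : List Char) (r : String) : String :=
  if cs = [] ∧ r = "" then "You entered an empty string"
  else
    let u := PySem.Chars.upper cs          -- s = s.upper()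
    let result :=
      match u[0]? with                      -- s[0]
      | none => r                           -- IndexError in Python; outside Pre_
      | some c => if 'A' ≤ c ∧ c ≤ 'Z' then r ++ PySem.Dict.getD natoDict c "" ++ " " else r
    if u.tail ≠ [] then phoneticAux u.tail result else result   -- s[1:]
termination_by cs.length
decreasing_by
  show (PySem.Chars.upper cs).tail.length < cs.length
  cases cs with
  | nil =>
    exact absurd (show ((PySem.Chars.upper ([] : List Char)).tail = []) from rfl) (by assumption)
  | cons a as => simp [PySem.Chars.upper]

def phonetic_alphabet (s : String) (r : String) : String := phoneticAux s.toList r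

-- ===== PORT B =====
-- B's word TABLE, indexed arithmetically by ord(c) - 65 (no dict)
def natoWords : List String :=
  ["Alpha","Bravo","Charlie","Delta","Echo","Foxtrot","Golf","Hotel","India","Juliet",
   "Kilo","Lima","Mike","November","Oscar","Papa","Quebec","Romeo","Sierra","Tango",
   "Uniform","Victor","Whiskey","Xray","Yankee","Zulu"]

-- i = ord(c) - 65; if 0 <= i < 26 the piece words[i] + " " is kept, else the char contributes nothing
def natoWord? (c : Char) : Option String :=
  let i : Int := (c.toNat : Int) - 65
  if 0 ≤ i ∧ i < 26 then some (natoWords.getD i.toNat "" ++ " ") else none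

-- "".join(pieces): ported by hand as a right fold of ++; exact, since join on "" is plain concatenation
def joinStr (ps : List String) : String := ps.foldr (· ++ ·) ""

def phonetic_alphabet_alt (s : String) (r : String) : String :=
  if s = "" ∧ r = "" then "You entered an empty string"
  else r ++ joinStr ((PySem.Chars.upper s.toList).filterMap natoWord?)

-- ===== PRECONDITION & SPEC =====
-- Pre_ excludes exactly the inputs where A raises IndexError: s == "" with r != "".
def Pre_phonetic_alphabet (s : String) (r : String) : Prop := s ≠ "" ∨ r = ""
instance (s : String) (r : String) : Decidable (Pre_phonetic_alphabet s r) := by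
  unfold Pre_phonetic_alphabet; infer_instance

def pvWitness_phonetic_alphabet : String × String := ("ok", "")

def Spec_phonetic_alphabet (s : String) (r : String) (out : String) : Prop := out = phonetic_alphabet_alt s r
instance (s : String) (r : String) (out : String) : Decidable (Spec_phonetic_alphabet s r out) := by unfold Spec_phonetic_alphabet; infer_instance

-- ===== CLAIM (what is proved, stated in full; the proofs are below) =====
def Claim_equal_phonetic_alphabet : Prop := ∀ (s : String) (r : String), Dom_phonetic_alphabet s r → Pre_phonetic_alphabet s r → Spec_phonetic_alphabet s r (phonetic_alphabet s r)


-- ===== LEMMAS AND PROOFS =====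

-- A's per-character step, as a fold step (proof-only helper)
def natoStep (acc : String) (c : Char) : String :=
  if 'A' ≤ c ∧ c ≤ 'Z' then acc ++ PySem.Dict.getD natoDict c "" ++ " " else acc

theorem upperChar_idem (c : Char) :
    PySem.Chars.upperChar (PySem.Chars.upperChar c) = PySem.Chars.upperChar c := by
  unfold PySem.Chars.upperChar PySem.Chars.islower
  by_cases h : ('a' ≤ c ∧ c ≤ 'z')
  · have h97 : 97 ≤ c.toNat := Nat.succ_le_of_lt h.1
    have h122 : c.toNat ≤ 122 := h.2
    have hv : (Char.ofNat (c.toNat - 32)).toNat = c.toNat - 32 := by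
      rw [Char.toNat_ofNat]
      have : Nat.isValidChar (c.toNat - 32) := Or.inl (by omega)
      simp [this]
    simp only [h.1, h.2, decide_true, Bool.and_true, if_true]
    have hna : ¬ ('a' ≤ Char.ofNat (c.toNat - 32)) := by
      intro hle
      have : 97 ≤ (Char.ofNat (c.toNat - 32)).toNat := Nat.succ_le_of_lt hle
      omega
    simp [hna]
  · have hb : (decide ('a' ≤ c) && decide (c ≤ 'z')) = false := by
      rcases not_and_or.mp h with h1 | h1 <;> simp [h1]
    simp [hb]

theorem upper_idem (cs : List Char) :
    PySem.Chars.upper (PySem.Chars.upper cs) = PySem.Chars.upper cs := by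
  simp [PySem.Chars.upper, Function.comp, upperChar_idem]

-- on an upper-fixed list, A's recursion is a left fold of natoStep (with the empty-both guard)
theorem phoneticAux_fixed (u : List Char) :
    ∀ r, PySem.Chars.upper u = u →
      phoneticAux u r =
        if u = [] ∧ r = "" then "You entered an empty string" else u.foldl natoStep r := by
  induction u with
  | nil =>
    intro r _
    rw [phoneticAux.eq_def]
    by_cases hr : r = "" <;> simp [hr, PySem.Chars.upper]
  | cons c rest ih =>
    intro r hfix
    have hc : PySem.Chars.upperChar c = c := by
      have := congrArg (List.headI) hfix
      simpa [PySem.Chars.upper] using this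
    have hrest : PySem.Chars.upper rest = rest := by
      have := congrArg (List.tail) hfix
      simpa [PySem.Chars.upper] using this
    rw [phoneticAux.eq_def]
    simp only [List.cons_ne_nil, false_and, if_false]
    have hufix : PySem.Chars.upper (c :: rest) = c :: rest := hfix
    rw [hufix]
    simp only [List.getElem?_cons_zero, List.tail_cons]
    by_cases hr : rest = []
    · subst hr
      simp [natoStep, List.foldl]
    · simp only [hr, ne_eq, not_false_iff, if_true]
      rw [ih _ hrest]
      simp [hr, natoStep, List.foldl]

-- for nonempty input, A equals a single fold of natoStep over the uppercased characters
theorem phoneticAux_eq_foldl (cs : List Char) (r : String) (h : cs ≠ []) :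
    phoneticAux cs r = (PySem.Chars.upper cs).foldl natoStep r := by
  have hulen : (PySem.Chars.upper cs).length = cs.length := by simp [PySem.Chars.upper]
  obtain ⟨c, urest, hu⟩ : ∃ c urest, PySem.Chars.upper cs = c :: urest := by
    cases hcs : PySem.Chars.upper cs with
    | nil => exact absurd ((List.length_eq_zero_iff).mp (by simpa [hcs] using hulen.symm)) h
    | cons c urest => exact ⟨c, urest, rfl⟩
  have hfixrest : PySem.Chars.upper urest = urest := by
    have := upper_idem cs
    rw [hu] at this
    have := congrArg (List.tail) this
    simpa [PySem.Chars.upper] using this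
  rw [phoneticAux.eq_def]
  simp only [h, false_and, if_false]
  rw [hu]
  simp only [List.getElem?_cons_zero, List.tail_cons]
  by_cases hrest : urest = []
  · subst hrest
    simp [natoStep, List.foldl]
  · simp only [hrest, ne_eq, not_false_iff, if_true]
    rw [phoneticAux_fixed _ _ hfixrest]
    simp [hrest, natoStep, List.foldl]

-- B's arithmetic table lookup agrees with A's guarded dict lookup, character by character
theorem natoWord?_eq (c : Char) :
    natoWord? c =
      if 'A' ≤ c ∧ c ≤ 'Z' then some (PySem.Dict.getD natoDict c "" ++ " ") else none := by
  have hle : ('A' ≤ c ∧ c ≤ 'Z') ↔ (65 ≤ c.toNat ∧ c.toNat ≤ 90) := by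
    rw [Char.le_def, Char.le_def, UInt32.le_iff_toNat_le, UInt32.le_iff_toNat_le]
    exact Iff.rfl
  unfold natoWord?
  by_cases h : 'A' ≤ c ∧ c ≤ 'Z'
  · obtain ⟨h1, h2⟩ := hle.mp h
    have hcond : (0 ≤ (c.toNat : Int) - 65 ∧ (c.toNat : Int) - 65 < 26) := by omega
    simp only [h, hcond]
    have htn : ((c.toNat : Int) - 65).toNat = c.toNat - 65 := by omega
    rw [htn]
    have hofc : Char.ofNat c.toNat = c := Char.ofNat_toNat c
    obtain ⟨n, hn, rfl⟩ : ∃ n, (65 ≤ n ∧ n ≤ 90) ∧ Char.ofNat n = c := ⟨c.toNat, ⟨h1, h2⟩, hofc⟩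
    obtain ⟨hn1, hn2⟩ := hn
    interval_cases n <;> decide
  · have hcond : ¬ (0 ≤ (c.toNat : Int) - 65 ∧ (c.toNat : Int) - 65 < 26) := by
      intro hc
      exact h (hle.mpr (by omega))
    rw [if_neg hcond, if_neg h]

-- the fold of A's step is r followed by the join of B's pieces
theorem foldl_natoStep_joinStr (l : List Char) :
    ∀ r, l.foldl natoStep r = r ++ joinStr (l.filterMap natoWord?) := by
  induction l with
  | nil => intro r; simp [joinStr, String.append_empty]
  | cons c rest ih =>
    intro r
    rw [List.foldl_cons, ih, List.filterMap_cons, natoWord?_eq c]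
    by_cases h : 'A' ≤ c ∧ c ≤ 'Z'
    · simp only [h]
      show natoStep r c ++ joinStr _ =
        r ++ ((PySem.Dict.getD natoDict c "" ++ " ") ++ joinStr (rest.filterMap natoWord?))
      simp [natoStep, h, String.append_assoc]
    · simp only [h, if_false]
      show natoStep r c ++ _ = _
      rw [natoStep, if_neg h]

-- ===== VERDICT (by name: the statement is the Claim_ definition above) =====
theorem phonetic_alphabet_spec : Claim_equal_phonetic_alphabet := by
  intro s r _ hpre
  unfold Spec_phonetic_alphabet phonetic_alphabet phonetic_alphabet_alt
  by_cases hs : s = ""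
  · subst hs
    have hr : r = "" := by
      rcases hpre with h | h
      · exact absurd rfl h
      · exact h
    subst hr
    rw [phoneticAux.eq_def]
    simp
  · have hlist : s.toList ≠ [] := by simpa using hs
    rw [phoneticAux_eq_foldl _ _ hlist, foldl_natoStep_joinStr]
    simp [hs]
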